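-- pv_equiv track=rewrite | github.com/beavishead/ML_sandbox | tags_accuracy_05.py | count_differing_pairs
-- ===== SOURCE A (Python) =====
-- from collections import defaultdict
--
-- def count_differing_pairs(n, k, m):
--     index_pairs_k = defaultdict(list)
--     index_pairs_m = defaultdict(list)
--
--     # Create dictionaries of indices for k and m
--     for i in range(n):
--         index_pairs_k[k[i]].append(i)
--         index_pairs_m[m[i]].append(i)
--
--     differing_pairs = 0
--
--     # Count differing pairs based on k
--     for indices in index_pairs_k.values():
--         if len(indices) > 1:
--             count = len(indices)
--             total_pairs = count * (count - 1) // 2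
--             same_pairs = sum(
--                 1 for i in range(len(indices))
--                 for j in range(i + 1, len(indices))
--                 if m[indices[i]] == m[indices[j]]
--             )
--             differing_pairs += total_pairs - same_pairs
--
--     # Count differing pairs based on m
--     for indices in index_pairs_m.values():
--         if len(indices) > 1:
--             count = len(indices)
--             total_pairs = count * (count - 1) // 2
--             same_pairs = sum(
--                 1 for i in range(len(indices))
--                 for j in range(i + 1, len(indices))
--                 if k[indices[i]] == k[indices[j]]
--             )
--             differing_pairs += total_pairs - same_pairs
--
--     return differing_pairs
-- ===== SOURCE B (Python) =====
-- from collections import Counter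
--
-- def count_differing_pairs(n, k, m):
--     kk = [k[i] for i in range(n)]
--     mm = [m[i] for i in range(n)]
--     pair_sum = lambda c: sum(v * (v - 1) // 2 for v in c.values())
--     # pairs equal in k + pairs equal in m - 2 * pairs equal in both
--     # = pairs differing in exactly one of k, m
--     return pair_sum(Counter(kk)) + pair_sum(Counter(mm)) - 2 * pair_sum(Counter(zip(kk, mm)))
-- ===== Notes on version B (the rewrite author's own statement) =====
-- stated objective: faster
-- what changed: A groups indices per value and counts equal pairs with a quadratic double loop inside every group; B never forms index groups: it tallies three Counters (k-values, m-values, (k,m)-pairs) and returns sum of c*(c-1)/2 over k-groups plus over m-groups minus twice over (k,m)-groups, by inclusion-exclusion.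
import Mathlib
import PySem

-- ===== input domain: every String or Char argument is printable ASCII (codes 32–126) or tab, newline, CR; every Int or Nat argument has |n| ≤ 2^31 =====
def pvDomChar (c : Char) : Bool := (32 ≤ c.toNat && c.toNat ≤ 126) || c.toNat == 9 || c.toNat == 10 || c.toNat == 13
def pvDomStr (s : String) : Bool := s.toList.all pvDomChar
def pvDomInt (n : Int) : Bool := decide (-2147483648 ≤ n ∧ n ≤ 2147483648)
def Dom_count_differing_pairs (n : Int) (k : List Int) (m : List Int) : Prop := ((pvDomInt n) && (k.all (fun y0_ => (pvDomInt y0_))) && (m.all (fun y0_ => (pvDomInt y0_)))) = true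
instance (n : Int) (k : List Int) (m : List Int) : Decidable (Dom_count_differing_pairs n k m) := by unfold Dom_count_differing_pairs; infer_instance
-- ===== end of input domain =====

-- B replaces A's per-group quadratic pair scans by three Counters and the closed form
-- Σ c(c-1)/2 (pairs equal in k) + Σ c(c-1)/2 (equal in m) − 2·Σ c(c-1)/2 (equal in both).

-- ===== PORT A =====
-- same_pairs = sum(1 for i … for j in range(i+1, …) if arr[indices[i]] == arr[indices[j]])
def pvSamePairs (arr : List Int) (indices : List Int) : Int :=
  (PySem.List.pyRange 0 (PySem.List.len indices)).foldl (fun s i =>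
    (PySem.List.pyRange (i + 1) (PySem.List.len indices)).foldl (fun s j =>
      if PySem.List.pyGetD arr (PySem.List.pyGetD indices i 0) 0
           == PySem.List.pyGetD arr (PySem.List.pyGetD indices j 0) 0
      then s + 1 else s) s) 0

-- one 'for indices in d.values()' accumulation loop of A
def pvGroupLoop (arr : List Int) (d : PySem.Dict Int (List Int)) (acc0 : Int) : Int :=
  d.values.foldl (fun acc indices =>
    if 1 < PySem.List.len indices then
      acc + (PySem.Int.floordiv (PySem.List.len indices * (PySem.List.len indices - 1)) 2
             - pvSamePairs arr indices)
    else acc) acc0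

def count_differing_pairs (n : Int) (k : List Int) (m : List Int) : Int :=
  -- for i in range(n): index_pairs_k[k[i]].append(i); index_pairs_m[m[i]].append(i)
  let dicts := (PySem.List.pyRange 0 n).foldl
    (fun d i => (d.1.modify (PySem.List.pyGetD k i 0) [] (fun g => g ++ [i]),
                 d.2.modify (PySem.List.pyGetD m i 0) [] (fun g => g ++ [i])))
    (PySem.Dict.empty, PySem.Dict.empty)
  pvGroupLoop k dicts.2 (pvGroupLoop m dicts.1 0)

-- ===== PORT B =====
-- sum(v * (v - 1) // 2 for v in c.values())
def pvPairSum {α : Type} [BEq α] (c : PySem.Dict α Int) : Int :=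
  (c.values.map (fun v => PySem.Int.floordiv (v * (v - 1)) 2)).sum

def count_differing_pairs_alt (n : Int) (k : List Int) (m : List Int) : Int :=
  let kk := (PySem.List.pyRange 0 n).map (fun i => PySem.List.pyGetD k i 0)
  let mm := (PySem.List.pyRange 0 n).map (fun i => PySem.List.pyGetD m i 0)
  pvPairSum (PySem.Dict.counter kk) + pvPairSum (PySem.Dict.counter mm)
    - 2 * pvPairSum (PySem.Dict.counter (kk.zip mm))

-- ===== PRECONDITION & SPEC =====
-- A raises IndexError when some i in range(n) is out of range of k or m; excluded here.
def Pre_count_differing_pairs (n : Int) (k : List Int) (m : List Int) : Prop :=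
  n ≤ (k.length : Int) ∧ n ≤ (m.length : Int)
instance (n : Int) (k : List Int) (m : List Int) : Decidable (Pre_count_differing_pairs n k m) := by
  unfold Pre_count_differing_pairs; infer_instance

def pvWitness_count_differing_pairs : Int × List Int × List Int := (3, [1, 1, 1], [1, 2, 1])

def Spec_count_differing_pairs (n : Int) (k : List Int) (m : List Int) (out : Int) : Prop := out = count_differing_pairs_alt n k m
instance (n : Int) (k : List Int) (m : List Int) (out : Int) : Decidable (Spec_count_differing_pairs n k m out) := by unfold Spec_count_differing_pairs; infer_instance

-- ===== CLAIM (what is proved, stated in full; the proofs are below) =====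
def Claim_equal_count_differing_pairs : Prop := ∀ (n : Int) (k : List Int) (m : List Int), Dom_count_differing_pairs n k m → Pre_count_differing_pairs n k m → Spec_count_differing_pairs n k m (count_differing_pairs n k m)

-- ===== LEMMAS AND PROOFS =====

-- number of ordered-position pairs (i < j) of l with R l[i] l[j]
def pvPC {α : Type} (R : α → α → Bool) : List α → Nat
  | [] => 0
  | x :: t => t.countP (fun y => R x y) + pvPC R t

theorem pvPC_append_singleton {α : Type} (R : α → α → Bool) (l : List α) (b : α) :
    pvPC R (l ++ [b]) = pvPC R l + l.countP (fun a => R a b) := by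
  induction l with
  | nil => simp [pvPC]
  | cons x t ih => simp [pvPC, ih, List.countP_cons]; omega

theorem pvPC_map {α β : Type} (R : β → β → Bool) (f : α → β) (l : List α) :
    pvPC R (l.map f) = pvPC (fun a b => R (f a) (f b)) l := by
  induction l with
  | nil => rfl
  | cons x t ih => simp [pvPC, ih, List.countP_map]; rfl

theorem pvPC_small {α : Type} (R : α → α → Bool) (l : List α) (h : l.length ≤ 1) :
    pvPC R l = 0 := by
  match l, h with
  | [], _ => rfl
  | [x], _ => simp [pvPC]

-- choose-2 step for Python's c*(c-1)//2
theorem pvCh2_step (c : Int) :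
    PySem.Int.floordiv ((c + 1) * c) 2 = PySem.Int.floordiv (c * (c - 1)) 2 + c := by
  have h : (c + 1) * c = c * (c - 1) + c * 2 := by ring
  rw [h, PySem.Int.floordiv_eq_ediv_of_pos (by omega), PySem.Int.floordiv_eq_ediv_of_pos (by omega),
    Int.add_mul_ediv_right _ _ (by omega : (2:Int) ≠ 0)]

theorem pvCh2_len {α : Type} (l : List α) :
    PySem.Int.floordiv ((l.length : Int) * ((l.length : Int) - 1)) 2
      = (pvPC (fun _ _ => true) l : Int) := by
  induction l with
  | nil => simp [pvPC]
  | cons x t ih =>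
    simp only [List.length_cons, pvPC, List.countP_true]
    have h : ((t.length : Int) + 1) * ((t.length : Int) + 1 - 1)
        = ((t.length : Int) + 1) * (t.length : Int) := by ring
    push_cast
    rw [h, pvCh2_step, ih]
    ring

theorem pvCountP_split {α : Type} (p : α → Bool) (t : List α) :
    t.countP p + t.countP (fun y => !(p y)) = t.length := by
  induction t with
  | nil => rfl
  | cons z s ih => simp only [List.countP_cons, List.length_cons]; cases h : p z <;> simp <;> omega

theorem pvPC_split {α : Type} (R : α → α → Bool) (l : List α) :
    pvPC R l + pvPC (fun a b => !(R a b)) l = pvPC (fun _ _ => true) l := by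
  induction l with
  | nil => rfl
  | cons x t ih =>
    simp only [pvPC, List.countP_true]
    have hc := pvCountP_split (fun y => R x y) t
    omega

theorem pvCountP_incl_excl {α : Type} (p q : α → Bool) (t : List α) :
    t.countP (fun y => p y && !(q y)) + t.countP (fun y => q y && !(p y))
      + 2 * t.countP (fun y => p y && q y)
      = t.countP p + t.countP q := by
  induction t with
  | nil => rfl
  | cons z s ih =>
    simp only [List.countP_cons]
    cases hp : p z <;> cases hq : q z <;> simp <;> omega

theorem pvPC_incl_excl {α : Type} (P Q : α → α → Bool) (l : List α) :
    pvPC (fun a b => P a b && !(Q a b)) l + pvPC (fun a b => Q a b && !(P a b)) l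
      + 2 * pvPC (fun a b => P a b && Q a b) l
      = pvPC P l + pvPC Q l := by
  induction l with
  | nil => rfl
  | cons x t ih =>
    simp only [pvPC]
    have hc := pvCountP_incl_excl (fun y => P x y) (fun y => Q x y) t
    omega

theorem pvSum_map_ite {α : Type} [DecidableEq α] (s : List α) (x : α) (c : Int)
    (hnd : s.Nodup) (hx : x ∈ s) :
    (s.map (fun v => if v = x then c else 0)).sum = c := by
  induction s with
  | nil => cases hx
  | cons a t ih =>
    rcases List.mem_cons.mp hx with h | h
    · subst h
      have hxt : x ∉ t := (List.nodup_cons.mp hnd).1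
      have hz : (t.map (fun v => if v = x then c else 0)).sum = 0 := by
        apply List.sum_eq_zero
        intro y hy
        rcases List.mem_map.mp hy with ⟨v, hv, rfl⟩
        have hvx : v ≠ x := fun hva => hxt (hva ▸ hv)
        simp [hvx]
      simp [hz]
    · have hna : a ≠ x := by
        rintro rfl; exact (List.nodup_cons.mp hnd).1 h
      simp only [List.map_cons, List.sum_cons, if_neg hna]
      rw [ih (List.nodup_cons.mp hnd).2 h]
      ring

-- updating one first-occurrence key's contribution in a sum over Set.ofList
theorem pvSum_ofList_step {α : Type} [BEq α] [LawfulBEq α] [DecidableEq α]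
    (ks : List α) (a : α) (f g : α → Int) (δ : Int)
    (hne : ∀ c, c ≠ a → g c = f c) (ha : g a = f a + δ) (h0 : a ∉ ks → f a = 0) :
    ((PySem.Set.ofList (ks ++ [a])).map g).sum = ((PySem.Set.ofList ks).map f).sum + δ := by
  have hof : PySem.Set.ofList (ks ++ [a]) = PySem.Set.add (PySem.Set.ofList ks) a := by
    rw [PySem.Set.ofList_eq_foldl, PySem.Set.ofList_eq_foldl, List.foldl_append]
    rfl
  by_cases hmem : a ∈ ks
  · have hadd : PySem.Set.add (PySem.Set.ofList ks) a = PySem.Set.ofList ks := by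
      simp [PySem.Set.add, PySem.Set.contains, hmem]
    rw [hof, hadd]
    have hpt : ∀ v ∈ PySem.Set.ofList ks, g v = f v + (fun w => if w = a then δ else 0) v := by
      intro v hv
      by_cases hva : v = a
      · subst hva; simp [ha]
      · simp [hne v hva, hva]
    rw [List.map_congr_left hpt, List.sum_map_add,
      pvSum_map_ite _ a δ (PySem.Set.nodup_ofList ks) ((PySem.Set.mem_ofList ks a).mpr hmem)]
  · have hadd : PySem.Set.add (PySem.Set.ofList ks) a = PySem.Set.ofList ks ++ [a] := by
      simp [PySem.Set.add, PySem.Set.contains, hmem]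
    rw [hof, hadd, List.map_append, List.sum_append]
    have hgf : ∀ v ∈ PySem.Set.ofList ks, g v = f v := by
      intro v hv
      exact hne v (fun hva => hmem (hva ▸ (PySem.Set.mem_ofList ks v).mp hv))
    rw [List.map_congr_left hgf]
    simp [ha, h0 hmem]

-- B's per-counter sum counts the equal pairs
theorem pvCounter_sum {α : Type} [BEq α] [LawfulBEq α] [DecidableEq α] (xs : List α) :
    pvPairSum (PySem.Dict.counter xs) = (pvPC (fun a b => a == b) xs : Int) := by
  have hform : pvPairSum (PySem.Dict.counter xs)
      = ((PySem.Set.ofList xs).map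
          (fun v => PySem.Int.floordiv ((xs.count v : Int) * ((xs.count v : Int) - 1)) 2)).sum := by
    simp only [pvPairSum, PySem.Dict.values, PySem.Dict.items_counter, List.map_map]
    rfl
  rw [hform]
  clear hform
  induction xs using List.reverseRecOn with
  | nil => simp [pvPC, PySem.Set.ofList_eq_foldl]
  | append_singleton l x ih =>
    rw [pvSum_ofList_step l x
      (fun v => PySem.Int.floordiv ((l.count v : Int) * ((l.count v : Int) - 1)) 2)
      (fun v => PySem.Int.floordiv (((l ++ [x]).count v : Int) * (((l ++ [x]).count v : Int) - 1)) 2)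
      ((l.count x : Int))]
    · rw [ih, pvPC_append_singleton]
      have hc : l.countP (fun a => a == x) = l.count x := rfl
      rw [hc]; push_cast; ring
    · intro c hc
      have hxc : (x == c) = false := by simp; exact fun h => hc h.symm
      simp [List.count_append, List.count_cons, hxc]
    · have hcnt : (l ++ [x]).count x = l.count x + 1 := by
        simp [List.count_append]
      rw [hcnt]
      push_cast
      have h1 : ((l.count x : Int) + 1) * ((l.count x : Int) + 1 - 1)
          = ((l.count x : Int) + 1) * (l.count x : Int) := by ring
      rw [h1, pvCh2_step]
    · intro hmem
      simp [List.count_eq_zero_of_not_mem hmem]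

-- sum over first-occurrence keys of within-group pair counts
theorem pvGroup_sum {α β : Type} [BEq α] [LawfulBEq α] [DecidableEq α] (R : β → β → Bool)
    (zs : List (α × β)) :
    ((PySem.Set.ofList (zs.map Prod.fst)).map
        (fun c => (pvPC R ((zs.filter (fun p => p.1 == c)).map Prod.snd) : Int))).sum
      = (pvPC (fun p q : α × β => p.1 == q.1 && R p.2 q.2) zs : Int) := by
  induction zs using List.reverseRecOn with
  | nil => simp [pvPC, PySem.Set.ofList_eq_foldl]
  | append_singleton l p ih =>
    rw [List.map_append, List.map_singleton]
    rw [pvSum_ofList_step (l.map Prod.fst) p.1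
      (fun c => (pvPC R ((l.filter (fun q => q.1 == c)).map Prod.snd) : Int))
      (fun c => (pvPC R (((l ++ [p]).filter (fun q => q.1 == c)).map Prod.snd) : Int))
      ((l.countP (fun q => q.1 == p.1 && R q.2 p.2) : Int))]
    · rw [ih, pvPC_append_singleton]
      push_cast; ring
    · intro c hc
      have hpc : (p.1 == c) = false := by simp; exact fun h => hc h.symm
      simp [List.filter_append, hpc]
    · have hflt : (l ++ [p]).filter (fun q => q.1 == p.1)
          = l.filter (fun q => q.1 == p.1) ++ [p] := by
        simp [List.filter_append]
      rw [hflt, List.map_append, List.map_singleton, pvPC_append_singleton]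
      have hcnt : ((l.filter (fun q => q.1 == p.1)).map Prod.snd).countP (fun y => R y p.2)
          = l.countP (fun q => q.1 == p.1 && R q.2 p.2) := by
        rw [List.countP_map, List.countP_filter]
        apply List.countP_congr
        intro q _
        simp [Function.comp, Bool.and_comm]
      rw [hcnt]
      push_cast; ring
    · intro hmem
      have hnil : l.filter (fun q => q.1 == p.1) = [] := by
        rw [List.filter_eq_nil_iff]
        intro q hq
        simp only [beq_iff_eq]
        intro h
        exact hmem (h ▸ List.mem_map_of_mem hq)
      simp [hnil, pvPC]

theorem pvGetD_append_lt {α : Type} (v w : List α) (i : Int) (d : α)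
    (h0 : 0 ≤ i) (h1 : i < (v.length : Int)) :
    PySem.List.pyGetD (v ++ w) i d = PySem.List.pyGetD v i d := by
  rw [PySem.List.pyGetD_eq_getElem _ d h0 (by simp; omega),
      PySem.List.pyGetD_eq_getElem _ d h0 h1]
  exact List.getElem_append_left (by omega)

theorem pvGetD_append_len {α : Type} (v : List α) (x : α) (d : α) :
    PySem.List.pyGetD (v ++ [x]) (v.length : Int) d = x := by
  rw [PySem.List.pyGetD_eq_getElem _ d (by omega) (by simp)]
  exact List.getElem_concat_length (by simp) _

theorem pvSum_map_ite_nat {α : Type} (p : α → Bool) (l : List α) :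
    (l.map (fun i => if p i then 1 else 0)).sum = l.countP p := by
  induction l with
  | nil => rfl
  | cons a t ih => cases h : p a <;> simp [h, ih]; omega

-- the positional double loop over a list counts pvPC
theorem pvNested (R : Int → Int → Bool) (v : List Int) :
    ((PySem.List.pyRange 0 (v.length : Int)).map (fun i =>
        (PySem.List.pyRange (i + 1) (v.length : Int)).countP
          (fun j => R (PySem.List.pyGetD v i 0) (PySem.List.pyGetD v j 0)))).sum
      = pvPC R v := by
  induction v using List.reverseRecOn with
  | nil => simp [pvPC]
  | append_singleton v x ih =>
    have hL : ((v ++ [x]).length : Int) = (v.length : Int) + 1 := by simp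
    rw [hL, PySem.List.pyRange_one_succ_right (by omega), List.map_append, List.sum_append]
    have hempty : PySem.List.pyRange ((v.length : Int) + 1) ((v.length : Int) + 1) = [] := by
      apply List.eq_nil_iff_forall_not_mem.mpr
      intro j hj
      have := PySem.List.mem_pyRange_one.mp hj
      omega
    have hmain : (PySem.List.pyRange 0 (v.length : Int)).map (fun i =>
        (PySem.List.pyRange (i + 1) ((v.length : Int) + 1)).countP
          (fun j => R (PySem.List.pyGetD (v ++ [x]) i 0) (PySem.List.pyGetD (v ++ [x]) j 0)))
        = (PySem.List.pyRange 0 (v.length : Int)).map (fun i =>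
            (PySem.List.pyRange (i + 1) (v.length : Int)).countP
              (fun j => R (PySem.List.pyGetD v i 0) (PySem.List.pyGetD v j 0))
            + (if R (PySem.List.pyGetD v i 0) x then 1 else 0)) := by
      apply List.map_congr_left
      intro i hi
      have hi' := PySem.List.mem_pyRange_one.mp hi
      have h2 : PySem.List.pyGetD (v ++ [x]) i 0 = PySem.List.pyGetD v i 0 :=
        pvGetD_append_lt v [x] i 0 (by omega) (by omega)
      have h3 : PySem.List.pyGetD (v ++ [x]) (v.length : Int) 0 = x := pvGetD_append_len v x 0
      rw [PySem.List.pyRange_one_succ_right (by omega), List.countP_append, List.countP_singleton]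
      have hc : List.countP (fun j => R (PySem.List.pyGetD (v ++ [x]) i 0)
            (PySem.List.pyGetD (v ++ [x]) j 0)) (PySem.List.pyRange (i + 1) (v.length : Int))
          = List.countP (fun j => R (PySem.List.pyGetD v i 0) (PySem.List.pyGetD v j 0))
              (PySem.List.pyRange (i + 1) (v.length : Int)) := by
        apply List.countP_congr
        intro j hj
        have hj' := PySem.List.mem_pyRange_one.mp hj
        rw [h2, pvGetD_append_lt v [x] j 0 (by omega) (by omega)]
      rw [hc, h2, h3]
    rw [hmain]
    have hsing : ((PySem.List.pyRange 0 (v.length : Int)).map (fun i =>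
        (PySem.List.pyRange (i + 1) (v.length : Int)).countP
          (fun j => R (PySem.List.pyGetD v i 0) (PySem.List.pyGetD v j 0))
        + (if R (PySem.List.pyGetD v i 0) x then 1 else 0))).sum
        = ((PySem.List.pyRange 0 (v.length : Int)).map (fun i =>
            (PySem.List.pyRange (i + 1) (v.length : Int)).countP
              (fun j => R (PySem.List.pyGetD v i 0) (PySem.List.pyGetD v j 0)))).sum
          + ((PySem.List.pyRange 0 (v.length : Int)).map
              (fun i => if R (PySem.List.pyGetD v i 0) x then 1 else 0)).sum := by
      rw [← List.sum_map_add]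
    rw [hsing, ih, pvSum_map_ite_nat, pvPC_append_singleton]
    have hcnt : (PySem.List.pyRange 0 (v.length : Int)).countP
        (fun i => R (PySem.List.pyGetD v i 0) x) = v.countP (fun a => R a x) := by
      conv_rhs => rw [← PySem.List.map_pyGetD_pyRange_zero v 0]
      rw [List.countP_map]
      rfl
    simp only [List.map_cons, List.map_nil, List.sum_cons, List.sum_nil, hempty, List.countP_nil]
    rw [hcnt]
    omega

-- A's same_pairs loop = pvPC of equal lookups
theorem pvSamePairs_eq (arr : List Int) (g : List Int) :
    pvSamePairs arr g
      = (pvPC (fun a b => PySem.List.pyGetD arr a 0 == PySem.List.pyGetD arr b 0) g : Int) := by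
  unfold pvSamePairs
  have hlen : PySem.List.len g = (g.length : Int) := by simp [PySem.List.len]
  rw [hlen]
  have hinner : ∀ (s i : Int),
      (PySem.List.pyRange (i + 1) (g.length : Int)).foldl (fun s j =>
        if PySem.List.pyGetD arr (PySem.List.pyGetD g i 0) 0
             == PySem.List.pyGetD arr (PySem.List.pyGetD g j 0) 0
        then s + 1 else s) s
      = s + ((PySem.List.pyRange (i + 1) (g.length : Int)).countP
          (fun j => PySem.List.pyGetD arr (PySem.List.pyGetD g i 0) 0
             == PySem.List.pyGetD arr (PySem.List.pyGetD g j 0) 0) : Int) := by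
    intro s i
    rw [PySem.List.foldl_ite_add_one (p := fun j =>
      (PySem.List.pyGetD arr (PySem.List.pyGetD g i 0) 0
         == PySem.List.pyGetD arr (PySem.List.pyGetD g j 0) 0) = true)]
    simp only [Bool.decide_eq_true]
  have houter : (fun (s i : Int) =>
      (PySem.List.pyRange (i + 1) (g.length : Int)).foldl (fun s j =>
        if PySem.List.pyGetD arr (PySem.List.pyGetD g i 0) 0
             == PySem.List.pyGetD arr (PySem.List.pyGetD g j 0) 0
        then s + 1 else s) s)
      = (fun (s i : Int) => s + ((PySem.List.pyRange (i + 1) (g.length : Int)).countP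
          (fun j => PySem.List.pyGetD arr (PySem.List.pyGetD g i 0) 0
             == PySem.List.pyGetD arr (PySem.List.pyGetD g j 0) 0) : Int)) := by
    funext s i; exact hinner s i
  rw [houter, PySem.List.foldl_add, zero_add]
  rw [← pvNested (fun a b => PySem.List.pyGetD arr a 0 == PySem.List.pyGetD arr b 0) g]
  rw [Nat.cast_list_sum, List.map_map]
  rfl

-- the per-group term of A's accumulation loop, without the length guard
theorem pvTerm_eq (arr : List Int) (g : List Int) :
    (if 1 < PySem.List.len g then
        PySem.Int.floordiv (PySem.List.len g * (PySem.List.len g - 1)) 2 - pvSamePairs arr g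
      else 0)
      = (pvPC (fun a b => !(PySem.List.pyGetD arr a 0 == PySem.List.pyGetD arr b 0)) g : Int) := by
  have hlen : PySem.List.len g = (g.length : Int) := by simp [PySem.List.len]
  rw [hlen]
  by_cases h : 1 < (g.length : Int)
  · rw [if_pos h, pvSamePairs_eq, pvCh2_len]
    have hs := pvPC_split (fun a b => PySem.List.pyGetD arr a 0 == PySem.List.pyGetD arr b 0) g
    omega
  · rw [if_neg h, pvPC_small _ _ (by omega)]
    simp

-- one grouping dict pass + accumulation loop of A
theorem pvGroupLoop_eq (key arr : List Int) (idx : List Int) (acc0 : Int) :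
    pvGroupLoop arr
      (idx.foldl (fun d i => d.modify (PySem.List.pyGetD key i 0) [] (fun g => g ++ [i]))
        PySem.Dict.empty) acc0
      = acc0 + (pvPC (fun i j => PySem.List.pyGetD key i 0 == PySem.List.pyGetD key j 0
                      && !(PySem.List.pyGetD arr i 0 == PySem.List.pyGetD arr j 0)) idx : Int) := by
  set d := idx.foldl (fun d i => d.modify (PySem.List.pyGetD key i 0) [] (fun g => g ++ [i]))
    PySem.Dict.empty with hd
  have hnodup : d.keys.Nodup := by
    rw [hd]
    exact PySem.Dict.nodup_keys_foldl_modify_key idx (fun i => PySem.List.pyGetD key i 0) []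
      (fun _ i => fun g => g ++ [i]) PySem.Dict.empty PySem.Dict.nodup_keys_empty
  have hkeys : d.keys = PySem.Set.ofList (idx.map (fun i => PySem.List.pyGetD key i 0)) := by
    rw [hd, PySem.Dict.keys_foldl_modify_key idx (fun i => PySem.List.pyGetD key i 0) []
      (fun _ i => fun g => g ++ [i]) PySem.Dict.empty, PySem.Dict.keys_empty,
      PySem.Set.ofList_eq_foldl]
    rfl
  have hgetD : ∀ c, d.getD c []
      = ((idx.map (fun i => (PySem.List.pyGetD key i 0, i))).filter
          (fun p => p.1 == c)).map Prod.snd := by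
    intro c
    rw [hd, show idx.foldl (fun d i => d.modify (PySem.List.pyGetD key i 0) [] (fun g => g ++ [i]))
          PySem.Dict.empty
        = (idx.map (fun i => (PySem.List.pyGetD key i 0, i))).foldl
            (fun d p => d.modify p.1 [] (fun g => g ++ [p.2])) PySem.Dict.empty
      from (List.foldl_map (f := fun i => (PySem.List.pyGetD key i 0, i))
        (g := fun (d : PySem.Dict Int (List Int)) p => d.modify p.1 [] (fun g => g ++ [p.2]))
        (l := idx) (init := PySem.Dict.empty)).symm]
    rw [PySem.Dict.getD_foldl_modify_append]
    simp [PySem.Dict.getD_empty]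
  have hvals : d.values = d.keys.map (fun c => d.getD c []) :=
    PySem.Dict.values_eq_map_keys d hnodup []
  unfold pvGroupLoop
  have hstep : (fun (acc : Int) (indices : List Int) =>
      if 1 < PySem.List.len indices then
        acc + (PySem.Int.floordiv (PySem.List.len indices * (PySem.List.len indices - 1)) 2
               - pvSamePairs arr indices)
      else acc)
      = (fun (acc : Int) (indices : List Int) =>
          acc + (pvPC (fun a b => !(PySem.List.pyGetD arr a 0 == PySem.List.pyGetD arr b 0))
                   indices : Int)) := by
    funext acc indices
    rw [← pvTerm_eq arr indices]
    split_ifs <;> ring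
  rw [hstep, PySem.List.foldl_add, hvals, hkeys, List.map_map]
  have hmapped : (List.map ((fun indices =>
        (pvPC (fun a b => !(PySem.List.pyGetD arr a 0 == PySem.List.pyGetD arr b 0)) indices : Int))
          ∘ fun c => d.getD c [])
        (PySem.Set.ofList (idx.map (fun i => PySem.List.pyGetD key i 0))))
      = (List.map (fun c =>
          (pvPC (fun a b => !(PySem.List.pyGetD arr a 0 == PySem.List.pyGetD arr b 0))
            (((idx.map (fun i => (PySem.List.pyGetD key i 0, i))).filter
              (fun p => p.1 == c)).map Prod.snd) : Int))
          (PySem.Set.ofList (idx.map (fun i => PySem.List.pyGetD key i 0)))) := by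
    apply List.map_congr_left
    intro c _
    simp only [Function.comp]
    rw [hgetD c]
  rw [hmapped]
  have hfst : idx.map (fun i => PySem.List.pyGetD key i 0)
      = (idx.map (fun i => (PySem.List.pyGetD key i 0, i))).map Prod.fst := by
    rw [List.map_map]; rfl
  rw [hfst, pvGroup_sum (fun a b => !(PySem.List.pyGetD arr a 0 == PySem.List.pyGetD arr b 0))
    (idx.map (fun i => (PySem.List.pyGetD key i 0, i))), pvPC_map]
-- ===== VERDICT (by name: the statement is the Claim_ definition above) =====
theorem count_differing_pairs_spec : Claim_equal_count_differing_pairs := by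
  intro n k m _ _
  unfold Spec_count_differing_pairs count_differing_pairs count_differing_pairs_alt
  rw [PySem.List.foldl_prod_mk
    (f := fun (d : PySem.Dict Int (List Int)) i =>
      d.modify (PySem.List.pyGetD k i 0) [] (fun g => g ++ [i]))
    (g := fun (d : PySem.Dict Int (List Int)) i =>
      d.modify (PySem.List.pyGetD m i 0) [] (fun g => g ++ [i]))]
  dsimp only
  rw [pvGroupLoop_eq k m (PySem.List.pyRange 0 n) 0,
      pvGroupLoop_eq m k (PySem.List.pyRange 0 n) _]
  rw [pvCounter_sum, pvCounter_sum, pvCounter_sum]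
  rw [List.zip_map', pvPC_map, pvPC_map, pvPC_map]
  have hbeq : (fun i j => ((PySem.List.pyGetD k i 0, PySem.List.pyGetD m i 0)
        == (PySem.List.pyGetD k j 0, PySem.List.pyGetD m j 0)))
      = (fun i j => PySem.List.pyGetD k i 0 == PySem.List.pyGetD k j 0
          && PySem.List.pyGetD m i 0 == PySem.List.pyGetD m j 0) := rfl
  rw [hbeq]
  have hIE : pvPC (fun i j => PySem.List.pyGetD k i 0 == PySem.List.pyGetD k j 0
        && !(PySem.List.pyGetD m i 0 == PySem.List.pyGetD m j 0)) (PySem.List.pyRange 0 n)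
      + pvPC (fun i j => PySem.List.pyGetD m i 0 == PySem.List.pyGetD m j 0
          && !(PySem.List.pyGetD k i 0 == PySem.List.pyGetD k j 0)) (PySem.List.pyRange 0 n)
      + 2 * pvPC (fun i j => PySem.List.pyGetD k i 0 == PySem.List.pyGetD k j 0
          && PySem.List.pyGetD m i 0 == PySem.List.pyGetD m j 0) (PySem.List.pyRange 0 n)
      = pvPC (fun i j => PySem.List.pyGetD k i 0 == PySem.List.pyGetD k j 0)
          (PySem.List.pyRange 0 n)
        + pvPC (fun i j => PySem.List.pyGetD m i 0 == PySem.List.pyGetD m j 0)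
            (PySem.List.pyRange 0 n) :=
    pvPC_incl_excl _ _ _
  omega
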